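-- pv_equiv track=rewrite | github.com/chkgk/PyTournament---Repeated-2x2-Games | game_analyser.py | sum_stepwise
-- ===== SOURCE A (Python) =====
-- def sum_stepwise(payoff_history):
-- 	sumA = 0
-- 	sumB = 0
-- 	stepsum_history = []
--
-- 	for run in payoff_history:
-- 		sumA += run[0]
-- 		sumB += run[1]
-- 		stepsum_history.append((sumA, sumB))
--
-- 	return stepsum_history
-- ===== SOURCE B (Python) =====
-- def sum_stepwise(payoff_history):
--     runs = list(payoff_history)
--     totA = sum(r[0] for r in runs)
--     totB = sum(r[1] for r in runs)
--     out = []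
--     for r in reversed(runs):
--         out.append((totA, totB))
--         totA -= r[0]
--         totB -= r[1]
--     out.reverse()
--     return out
-- ===== Notes on version B (the rewrite author's own statement) =====
-- stated objective: alternative
-- what changed: Instead of accumulating prefix sums forward, B computes the grand totals once and builds the result back-to-front by walking the list in reverse and subtracting each element's payoffs (suffix subtraction), then reverses the output.
import Mathlib
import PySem

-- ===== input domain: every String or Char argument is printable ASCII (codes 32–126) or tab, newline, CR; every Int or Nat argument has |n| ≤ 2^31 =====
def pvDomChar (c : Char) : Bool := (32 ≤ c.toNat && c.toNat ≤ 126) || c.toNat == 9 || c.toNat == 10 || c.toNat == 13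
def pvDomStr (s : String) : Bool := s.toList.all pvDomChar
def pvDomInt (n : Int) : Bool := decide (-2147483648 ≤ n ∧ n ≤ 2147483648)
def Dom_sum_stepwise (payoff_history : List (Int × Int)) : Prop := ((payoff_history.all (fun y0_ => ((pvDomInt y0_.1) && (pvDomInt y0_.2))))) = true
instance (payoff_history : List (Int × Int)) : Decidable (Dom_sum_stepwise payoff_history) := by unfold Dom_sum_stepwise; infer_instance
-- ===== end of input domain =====

-- B builds the result back-to-front: grand totals first, then a reverse walk subtracting each element (suffix subtraction), same cost.

-- ===== PORT A =====
-- the loop over payoff_history with state (sumA, sumB, stepsum_history), appending each step pair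
def sum_stepwise (payoff_history : List (Int × Int)) : List (Int × Int) :=
  (payoff_history.foldl
    (fun (st : Int × Int × List (Int × Int)) run =>
      (st.1 + run.1, st.2.1 + run.2, st.2.2 ++ [(st.1 + run.1, st.2.1 + run.2)]))
    (0, 0, [])).2.2

-- ===== PORT B =====
-- the reverse loop of Source B: emit (totA, totB), then subtract the visited element
def pvBackLoop : Int → Int → List (Int × Int) → List (Int × Int) → List (Int × Int)
  | _, _, [], out => out
  | a, b, r :: rest, out => pvBackLoop (a - r.1) (b - r.2) rest (out ++ [(a, b)])

def sum_stepwise_alt (payoff_history : List (Int × Int)) : List (Int × Int) :=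
  let totA := payoff_history.foldl (fun s r => s + r.1) 0
  let totB := payoff_history.foldl (fun s r => s + r.2) 0
  (pvBackLoop totA totB payoff_history.reverse []).reverse

-- ===== PRECONDITION & SPEC =====
def Spec_sum_stepwise (payoff_history : List (Int × Int)) (out : List (Int × Int)) : Prop := out = sum_stepwise_alt payoff_history
instance (payoff_history : List (Int × Int)) (out : List (Int × Int)) : Decidable (Spec_sum_stepwise payoff_history out) := by unfold Spec_sum_stepwise; infer_instance

-- ===== CLAIM (what is proved, stated in full; the proofs are below) =====
def Claim_equal_sum_stepwise : Prop := ∀ (payoff_history : List (Int × Int)), Dom_sum_stepwise payoff_history → Spec_sum_stepwise payoff_history (sum_stepwise payoff_history)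

-- ===== LEMMAS AND PROOFS =====

-- canonical prefix-sum pairs, a proof-only helper
def pvAcc : Int → Int → List (Int × Int) → List (Int × Int)
  | _, _, [] => []
  | a, b, r :: t => (a + r.1, b + r.2) :: pvAcc (a + r.1) (b + r.2) t

-- suffix-subtract sequence, a proof-only helper characterising pvBackLoop
def pvSub : Int → Int → List (Int × Int) → List (Int × Int)
  | _, _, [] => []
  | a, b, r :: t => (a, b) :: pvSub (a - r.1) (b - r.2) t

theorem pvBackLoop_eq (l : List (Int × Int)) (a b : Int) (out : List (Int × Int)) :
    pvBackLoop a b l out = out ++ pvSub a b l := by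
  induction l generalizing a b out with
  | nil => simp [pvBackLoop, pvSub]
  | cons h t ih => simp [pvBackLoop, pvSub, ih]

theorem pvSub_append (xs ys : List (Int × Int)) (a b : Int) :
    pvSub a b (xs ++ ys)
      = pvSub a b xs
        ++ pvSub (a - xs.foldl (fun s r => s + r.1) 0) (b - xs.foldl (fun s r => s + r.2) 0) ys := by
  induction xs generalizing a b with
  | nil => simp [pvSub]
  | cons h t ih =>
      simp only [List.cons_append, pvSub, ih, List.foldl_cons]
      have h1 : ∀ (c : Int) (l : List (Int × Int)),
          l.foldl (fun s r => s + r.1) c = c + l.foldl (fun s r => s + r.1) 0 := by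
        intro c l
        induction l generalizing c with
        | nil => simp
        | cons x xs ih2 => simp only [List.foldl_cons]; rw [ih2 (c + x.1), ih2 (0 + x.1)]; ring
      have h2 : ∀ (c : Int) (l : List (Int × Int)),
          l.foldl (fun s r => s + r.2) c = c + l.foldl (fun s r => s + r.2) 0 := by
        intro c l
        induction l generalizing c with
        | nil => simp
        | cons x xs ih2 => simp only [List.foldl_cons]; rw [ih2 (c + x.2), ih2 (0 + x.2)]; ring
      rw [h1 (0 + h.1), h2 (0 + h.2)]
      ring_nf

theorem foldl_fst_shift (l : List (Int × Int)) (c : Int) :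
    l.foldl (fun s r => s + r.1) c = c + l.foldl (fun s r => s + r.1) 0 := by
  induction l generalizing c with
  | nil => simp
  | cons x xs ih => simp only [List.foldl_cons]; rw [ih (c + x.1), ih (0 + x.1)]; ring

theorem foldl_snd_shift (l : List (Int × Int)) (c : Int) :
    l.foldl (fun s r => s + r.2) c = c + l.foldl (fun s r => s + r.2) 0 := by
  induction l generalizing c with
  | nil => simp
  | cons x xs ih => simp only [List.foldl_cons]; rw [ih (c + x.2), ih (0 + x.2)]; ring

-- reversed prefix sums = suffix subtraction from the totals
theorem foldl_fst_reverse (t : List (Int × Int)) :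
    t.reverse.foldl (fun s r => s + r.1) 0 = t.foldl (fun s r => s + r.1) 0 := by
  rw [List.foldl_reverse]
  induction t with
  | nil => simp
  | cons x xs ih =>
      simp only [List.foldr_cons, List.foldl_cons]
      rw [ih, foldl_fst_shift xs (0 + x.1)]; ring

theorem foldl_snd_reverse (t : List (Int × Int)) :
    t.reverse.foldl (fun s r => s + r.2) 0 = t.foldl (fun s r => s + r.2) 0 := by
  rw [List.foldl_reverse]
  induction t with
  | nil => simp
  | cons x xs ih =>
      simp only [List.foldr_cons, List.foldl_cons]
      rw [ih, foldl_snd_shift xs (0 + x.2)]; ring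

theorem pvAcc_reverse (l : List (Int × Int)) (a b : Int) :
    (pvAcc a b l).reverse
      = pvSub (a + l.foldl (fun s r => s + r.1) 0) (b + l.foldl (fun s r => s + r.2) 0) l.reverse := by
  induction l generalizing a b with
  | nil => simp [pvAcc, pvSub]
  | cons h t ih =>
      simp only [pvAcc, List.reverse_cons, pvSub_append, List.foldl_cons]
      rw [ih (a + h.1) (b + h.2), foldl_fst_reverse, foldl_snd_reverse,
        foldl_fst_shift t (0 + h.1), foldl_snd_shift t (0 + h.2)]
      simp only [pvSub]
      congr 1
      · congr 1 <;> ring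
      · congr 1; ring_nf

-- A's loop invariant: the appended history is the canonical prefix-sum list
theorem sum_stepwise_loop_inv (l : List (Int × Int)) (a b : Int) (acc : List (Int × Int)) :
    (l.foldl
      (fun (st : Int × Int × List (Int × Int)) run =>
        (st.1 + run.1, st.2.1 + run.2, st.2.2 ++ [(st.1 + run.1, st.2.1 + run.2)]))
      (a, b, acc)).2.2 = acc ++ pvAcc a b l := by
  induction l generalizing a b acc with
  | nil => simp [pvAcc]
  | cons h t ih => simp [List.foldl_cons, pvAcc, ih]

-- ===== VERDICT (by name: the statement is the Claim_ definition above) =====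
theorem sum_stepwise_spec : Claim_equal_sum_stepwise := by
  intro l _
  show _ = _
  unfold sum_stepwise sum_stepwise_alt
  rw [sum_stepwise_loop_inv]
  show [] ++ pvAcc 0 0 l
      = (pvBackLoop (l.foldl (fun s r => s + r.1) 0) (l.foldl (fun s r => s + r.2) 0) l.reverse []).reverse
  rw [pvBackLoop_eq]
  simp only [List.nil_append]
  have := pvAcc_reverse l 0 0
  simp only [zero_add] at this
  rw [← this, List.reverse_reverse]
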